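-- pv_equiv track=rewrite | github.com/dbetm/cp-history | Interviews/CrackingTheCodeInterview/BitManipulation/AC_Opt_NextSmallestLargest.py | turn_off_next_one_after_zero
-- ===== SOURCE A (Python) =====
-- from typing import Tuple
--
-- def turn_off_next_one_after_zero(str_bin) -> Tuple[str, int]:
--     n = len(str_bin)
--     new_str = ""
--     has_found_zero = False
--     ptr = -1
--
--     for i in range(n - 1, -1, -1):
--         if str_bin[i] == "1" and has_found_zero:
--             new_str += "0"
--             new_str += str_bin[:i][::-1]
--             ptr += 1
--             break
--
--         if str_bin[i] == "0" and not has_found_zero: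
--             has_found_zero = True
--
--         new_str += str_bin[i]
--         ptr += 1
--
--     return (new_str[::-1], ptr)
-- ===== SOURCE B (Python) =====
-- def turn_off_next_one_after_zero(str_bin):
--     n = len(str_bin)
--     i0 = str_bin.rfind("0")
--     if i0 == -1:
--         return (str_bin, n - 1)
--     i = str_bin.rfind("1", 0, i0)
--     if i == -1:
--         return (str_bin, n - 1)
--     return (str_bin[:i] + "0" + str_bin[i + 1:], n - 1 - i)
-- ===== Notes on version B (the rewrite author's own statement) =====
-- stated objective: faster
-- what changed: B replaces A's right-to-left accumulator loop (building the reversed result char-by-char with repeated string concatenation, then reversing) by two rfind calls (rightmost '0', then rightmost '1' left of it) plus one slice and index arithmetic.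
import Mathlib
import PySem

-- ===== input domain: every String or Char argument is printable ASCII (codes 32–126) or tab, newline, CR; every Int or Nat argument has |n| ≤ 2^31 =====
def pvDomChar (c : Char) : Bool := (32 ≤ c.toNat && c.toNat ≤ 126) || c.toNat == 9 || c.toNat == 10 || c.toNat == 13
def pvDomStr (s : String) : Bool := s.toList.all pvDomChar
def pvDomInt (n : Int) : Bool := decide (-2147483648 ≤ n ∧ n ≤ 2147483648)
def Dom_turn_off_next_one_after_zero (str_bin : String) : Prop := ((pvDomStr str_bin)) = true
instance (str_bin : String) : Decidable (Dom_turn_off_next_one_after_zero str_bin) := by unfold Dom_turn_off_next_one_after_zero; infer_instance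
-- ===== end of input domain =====

-- B finds the bit to flip with two rfind searches and one slice instead of A's
-- char-by-char accumulator loop with double reversal (objective: idiomatic).

-- ===== PORT A =====
-- A's loop 'for i in range(n-1, -1, -1)' visits the characters of str_bin from the
-- right; we transcribe it as structural recursion over str_bin.toList.reverse, so at
-- each step the head is str_bin[i] and the tail is str_bin[:i][::-1] (exact).
-- State = (new_str as a char list built by append, has_found_zero, ptr), as in A.
def pvAGo (rcs : List Char) (new : List Char) (found : Bool) (ptr : Int) : List Char × Int :=
  match rcs with
  | [] => (new, ptr)
  | c :: rest =>
    if c = '1' ∧ found then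
      -- new_str += "0"; new_str += str_bin[:i][::-1]; ptr += 1; break
      (new ++ '0' :: rest, ptr + 1)
    else
      let found' := if c = '0' ∧ ¬found then true else found
      pvAGo rest (new ++ [c]) found' (ptr + 1)

def turn_off_next_one_after_zero (str_bin : String) : String × Int :=
  let r := pvAGo str_bin.toList.reverse [] false (-1)
  (String.ofList r.1.reverse, r.2)  -- return (new_str[::-1], ptr)

-- ===== PORT B =====
-- str.rfind(c, 0, stop): index of the last occurrence of the char c before stop,
-- -1 if none (exact for a single-char needle; the last occurrence is computed as
-- the first occurrence in the reversed list).
def pvRfind (cs : List Char) (c : Char) : Int :=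
  match cs.reverse.findIdx? (· = c) with
  | none => -1
  | some j => (cs.length : Int) - 1 - j

def turn_off_next_one_after_zero_alt (str_bin : String) : String × Int :=
  let cs := str_bin.toList
  let n : Int := cs.length
  let i0 := pvRfind cs '0'
  if i0 = -1 then (str_bin, n - 1)
  else
    let i := pvRfind (cs.take i0.toNat) '1'
    if i = -1 then (str_bin, n - 1)
    else (String.ofList (cs.take i.toNat ++ '0' :: cs.drop (i.toNat + 1)), n - 1 - i)

-- ===== PRECONDITION & SPEC =====
def Spec_turn_off_next_one_after_zero (str_bin : String) (out : String × Int) : Prop := out = turn_off_next_one_after_zero_alt str_bin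
instance (str_bin : String) (out : String × Int) : Decidable (Spec_turn_off_next_one_after_zero str_bin out) := by unfold Spec_turn_off_next_one_after_zero; infer_instance

-- ===== CLAIM (what is proved, stated in full; the proofs are below) =====
def Claim_equal_turn_off_next_one_after_zero : Prop := ∀ (str_bin : String), Dom_turn_off_next_one_after_zero str_bin → Spec_turn_off_next_one_after_zero str_bin (turn_off_next_one_after_zero str_bin)

-- ===== LEMMAS AND PROOFS =====

-- A's loop with has_found_zero = False copies characters until it meets a '0'.
theorem pvAGo_no0 (rcs : List Char) (new : List Char) (ptr : Int) (h : '0' ∉ rcs) :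
    pvAGo rcs new false ptr = (new ++ rcs, ptr + rcs.length) := by
  induction rcs generalizing new ptr with
  | nil => simp [pvAGo]
  | cons c rest ih =>
    have hc : c ≠ '0' := fun hc => h (hc ▸ List.mem_cons_self)
    have hrest : '0' ∉ rest := fun hm => h (List.mem_cons_of_mem _ hm)
    simp only [pvAGo, Bool.false_eq_true, and_false, if_false, not_false_eq_true, and_true,
      if_neg hc]
    rw [ih _ _ hrest]
    congr 1
    · simp
    · simp only [List.length_cons]; push_cast; omega

-- A's loop with has_found_zero = True copies characters while no '1' appears.
theorem pvAGo_no1 (rcs : List Char) (new : List Char) (ptr : Int) (h : '1' ∉ rcs) :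
    pvAGo rcs new true ptr = (new ++ rcs, ptr + rcs.length) := by
  induction rcs generalizing new ptr with
  | nil => simp [pvAGo]
  | cons c rest ih =>
    have hc : c ≠ '1' := fun hc => h (hc ▸ List.mem_cons_self)
    have hrest : '1' ∉ rest := fun hm => h (List.mem_cons_of_mem _ hm)
    simp only [pvAGo, hc, false_and, if_false, not_true, and_false]
    rw [ih _ _ hrest]
    congr 1
    · simp
    · simp only [List.length_cons]; push_cast; omega

-- A's loop with has_found_zero = True breaks at the first '1' of the remaining input.
theorem pvAGo_found (u v : List Char) (new : List Char) (ptr : Int) (h : '1' ∉ u) :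
    pvAGo (u ++ '1' :: v) new true ptr = (new ++ u ++ '0' :: v, ptr + u.length + 1) := by
  induction u generalizing new ptr with
  | nil => simp [pvAGo]
  | cons c u' ih =>
    have hc : c ≠ '1' := fun hc => h (hc ▸ List.mem_cons_self)
    have hu' : '1' ∉ u' := fun hm => h (List.mem_cons_of_mem _ hm)
    simp only [List.cons_append, pvAGo, hc, false_and, if_false, not_true, and_false]
    rw [ih _ _ hu']
    congr 1
    · simp
    · simp only [List.length_cons]; push_cast; omega

-- A's loop turns has_found_zero on at the first '0' of the input.
theorem pvAGo_pre0 (u v : List Char) (new : List Char) (ptr : Int) (h : '0' ∉ u) :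
    pvAGo (u ++ '0' :: v) new false ptr =
      pvAGo v (new ++ u ++ ['0']) true (ptr + u.length + 1) := by
  induction u generalizing new ptr with
  | nil => simp [pvAGo]
  | cons c u' ih =>
    have hc : c ≠ '0' := fun hc => h (hc ▸ List.mem_cons_self)
    have hu' : '0' ∉ u' := fun hm => h (List.mem_cons_of_mem _ hm)
    simp only [List.cons_append, pvAGo, Bool.false_eq_true, and_false, if_false,
      not_false_eq_true, and_true, if_neg hc]
    rw [ih _ _ hu']
    congr 1
    · simp
    · simp only [List.length_cons]; push_cast; omega

-- pvRfind when the character does not occur.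
theorem pvRfind_neg (cs : List Char) (c : Char) (h : c ∉ cs) : pvRfind cs c = -1 := by
  have : cs.reverse.findIdx? (· = c) = none := by
    rw [List.findIdx?_eq_none_iff]
    intro x hx
    simp only [decide_eq_false_iff_not]
    exact fun hxc => h (hxc ▸ (List.mem_reverse.mp hx))
  simp [pvRfind, this]

-- pvRfind when the reverse decomposes at the first occurrence.
theorem pvRfind_pos (cs u v : List Char) (c : Char)
    (hdec : cs.reverse = u ++ c :: v) (h : c ∉ u) : pvRfind cs c = v.length := by
  have hfind : cs.reverse.findIdx? (· = c) = some u.length := by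
    rw [hdec, List.findIdx?_append]
    have hu : u.findIdx? (· = c) = none := by
      rw [List.findIdx?_eq_none_iff]
      intro x hx
      simp only [decide_eq_false_iff_not]
      exact fun hxc => h (hxc ▸ hx)
    simp [hu, List.findIdx?_cons]
  have hlen : cs.length = u.length + 1 + v.length := by
    have h2 := congrArg List.length hdec
    simp at h2
    omega
  simp only [pvRfind, hfind]
  omega

-- ===== VERDICT (by name: the statement is the Claim_ definition above) =====
theorem turn_off_next_one_after_zero_spec : Claim_equal_turn_off_next_one_after_zero := by
  intro s _
  simp only [Spec_turn_off_next_one_after_zero, turn_off_next_one_after_zero,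
    turn_off_next_one_after_zero_alt]
  set cs := s.toList with hcs
  by_cases h0 : '0' ∈ cs
  · -- a '0' exists; decompose the reverse at its first occurrence
    obtain ⟨u0, w, hdec0, hu0⟩ := List.eq_append_cons_of_mem (List.mem_reverse.mpr h0)
    have hi0 : pvRfind cs '0' = w.length := pvRfind_pos cs u0 w '0' hdec0 hu0
    have hcs' : cs = w.reverse ++ '0' :: u0.reverse := by
      have := congrArg List.reverse hdec0
      simpa using this
    have htake : cs.take w.length = w.reverse := by
      rw [hcs']
      exact List.take_left' (by simp)
    have hA := pvAGo_pre0 u0 w [] (-1) hu0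
    by_cases h1 : '1' ∈ w
    · -- a '1' left of the rightmost '0': flip it
      obtain ⟨u1, v1, hdec1, hu1⟩ := List.eq_append_cons_of_mem h1
      have hw : w.reverse.reverse = u1 ++ '1' :: v1 := by simpa using hdec1
      have hi1 : pvRfind w.reverse '1' = v1.length := pvRfind_pos w.reverse u1 v1 '1' hw hu1
      have hB : pvRfind (cs.take (pvRfind cs '0').toNat) '1' = (v1.length : Int) := by
        rw [hi0, Int.toNat_natCast, htake, hi1]
      have hAeq := pvAGo_found u1 v1 ([] ++ u0 ++ ['0']) (-1 + u0.length + 1) hu1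
      rw [hdec0, hA, hdec1, hAeq]
      rw [if_neg (by rw [hi0]; omega), hB, if_neg (by omega)]
      have hcsdec : cs = (v1.reverse ++ ['1']) ++ (u1.reverse ++ '0' :: u0.reverse) := by
        rw [hcs', hdec1]; simp
      have htake1 : cs.take ((v1.length : Int)).toNat = v1.reverse := by
        rw [Int.toNat_natCast, hcsdec, List.append_assoc]
        exact List.take_left' (by simp)
      have hdrop1 : cs.drop (((v1.length : Int)).toNat + 1) = u1.reverse ++ '0' :: u0.reverse := by
        rw [Int.toNat_natCast, hcsdec]
        exact List.drop_left' (by simp)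
      have hlen : cs.length = u0.length + 1 + (u1.length + 1 + v1.length) := by
        have h2 := congrArg List.length hcsdec
        simp at h2
        omega
      simp only [Prod.mk.injEq]
      constructor
      · rw [htake1, hdrop1]
        congr 1
        simp
      · omega
    · -- no '1' left of the rightmost '0': nothing to flip
      have hB : pvRfind (cs.take (pvRfind cs '0').toNat) '1' = -1 := by
        rw [hi0, Int.toNat_natCast, htake]
        exact pvRfind_neg _ _ (by simpa using h1)
      rw [hdec0, hA, pvAGo_no1 w ([] ++ u0 ++ ['0']) _ h1]
      rw [if_neg (by rw [hi0]; omega), hB, if_pos rfl]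
      have hlen : cs.length = w.length + 1 + u0.length := by
        have h2 := congrArg List.length hcs'
        simp at h2
        omega
      simp only [Prod.mk.injEq]
      constructor
      · have hrev : (([] ++ u0 ++ ['0']) ++ w).reverse = cs := by
          rw [hcs']; simp
        rw [hrev, hcs]
        exact String.ofList_toList
      · omega
  · -- no '0' at all: the loop just copies the string
    have hr0 : '0' ∉ cs.reverse := by simpa using h0
    rw [pvRfind_neg cs '0' h0, if_pos rfl]
    rw [pvAGo_no0 cs.reverse [] (-1) hr0]
    simp only [Prod.mk.injEq]
    constructor
    · rw [show (([] : List Char) ++ cs.reverse).reverse = cs by simp, hcs]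
      exact String.ofList_toList
    · simp only [List.length_reverse]
      omega
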